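-- pv_equiv track=rewrite | github.com/shobhitjuglan/Python-challenges | Day6(extra_challenge).py | zeroed
-- ===== SOURCE A (Python) =====
-- def zeroed(l):
--     count = 0
--     l[count] = 0
--     try:
--         while(True):
--             l[count + 1]
--             count = count + 1
--     except:
--         l[count] = 0
--     return l
-- ===== SOURCE B (Python) =====
-- def zeroed(l):
--     l[0] = 0
--     l[-1] = 0
--     return l
-- ===== Notes on version B (the rewrite author's own statement) =====
-- stated objective: simpler
-- what changed: Replaces the try/while linear walk that finds the last index with two O(1) direct assignments l[0]=0 and l[-1]=0.
import Mathlib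
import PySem

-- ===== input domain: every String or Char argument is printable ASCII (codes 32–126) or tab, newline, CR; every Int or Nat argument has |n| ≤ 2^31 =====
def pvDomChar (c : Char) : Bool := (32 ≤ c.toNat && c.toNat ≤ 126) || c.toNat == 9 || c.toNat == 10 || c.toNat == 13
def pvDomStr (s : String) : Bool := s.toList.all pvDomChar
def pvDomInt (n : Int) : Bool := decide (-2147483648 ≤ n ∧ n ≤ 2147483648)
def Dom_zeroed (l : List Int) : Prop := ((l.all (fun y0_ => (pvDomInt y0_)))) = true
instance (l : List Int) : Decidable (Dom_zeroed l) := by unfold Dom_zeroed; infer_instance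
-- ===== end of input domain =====

-- B replaces A's try/while walk to the last index with direct assignments l[0]=0, l[-1]=0 (simpler).
-- Both A and B mutate the argument list in place in Python; the proved equivalence is about the returned value.

-- ===== PORT A =====
-- the try/while(True) loop: probe l[count+1]; on IndexError set l[count] = 0 and stop
def zeroedLoop (l : List Int) (count : Nat) : List Int :=
  if count + 1 < l.length then zeroedLoop l (count + 1) else l.set count 0
termination_by l.length - count

def zeroed (l : List Int) : List Int :=
  let l := l.set 0 0      -- l[count] = 0 with count = 0 (raises on []; excluded by Pre_)
  zeroedLoop l 0

-- ===== PORT B =====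
def zeroed_alt (l : List Int) : List Int :=
  let l := l.set 0 0                 -- l[0] = 0
  l.set (l.length - 1) 0             -- l[-1] = 0

-- ===== PRECONDITION & SPEC =====
-- A (and B) raise IndexError on the empty list; nothing else is excluded.
def Pre_zeroed (l : List Int) : Prop := l ≠ []
instance (l : List Int) : Decidable (Pre_zeroed l) := by unfold Pre_zeroed; infer_instance
def pvWitness_zeroed : List Int := [3, 4]

def Spec_zeroed (l : List Int) (out : List Int) : Prop := out = zeroed_alt l
instance (l : List Int) (out : List Int) : Decidable (Spec_zeroed l out) := by unfold Spec_zeroed; infer_instance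

-- ===== CLAIM (what is proved, stated in full; the proofs are below) =====
def Claim_equal_zeroed : Prop := ∀ (l : List Int), Dom_zeroed l → Pre_zeroed l → Spec_zeroed l (zeroed l)

-- ===== LEMMAS AND PROOFS =====
theorem zeroedLoop_eq (l : List Int) (count : Nat) (h : count < l.length) :
    zeroedLoop l count = l.set (l.length - 1) 0 := by
  unfold zeroedLoop
  split
  · exact zeroedLoop_eq l (count + 1) (by omega)
  · congr 1; omega
termination_by l.length - count

-- ===== VERDICT (by name: the statement is the Claim_ definition above) =====
theorem zeroed_spec : Claim_equal_zeroed := by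
  intro l _ hpre
  unfold Spec_zeroed zeroed zeroed_alt
  have hl : 0 < l.length := List.length_pos_of_ne_nil hpre
  rw [zeroedLoop_eq _ 0 (by simpa using hl)]
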